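-- pv_equiv track=rewrite | github.com/paiml/depyler | examples/hard_str_smallest_rotation.py | rotation_at
-- ===== SOURCE A (Python) =====
-- def rotation_at(s: str, start: int) -> str:
--     n: int = len(s)
--     result: str = ""
--     i: int = 0
--     while i < n:
--         idx: int = (start + i) % n
--         result = result + s[idx]
--         i = i + 1
--     return result
-- ===== SOURCE B (Python) =====
-- def rotation_at(s: str, start: int) -> str:
--     n = len(s)
--     if n == 0:
--         return ""
--     k = start % n
--     return s[k:] + s[:k]
-- ===== Notes on version B (the rewrite author's own statement) =====
-- stated objective: simpler
-- what changed: Replaced the per-character modular indexing loop with a closed-form construction: k = start % n and the result is the two slices s[k:] + s[:k].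
import Mathlib
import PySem

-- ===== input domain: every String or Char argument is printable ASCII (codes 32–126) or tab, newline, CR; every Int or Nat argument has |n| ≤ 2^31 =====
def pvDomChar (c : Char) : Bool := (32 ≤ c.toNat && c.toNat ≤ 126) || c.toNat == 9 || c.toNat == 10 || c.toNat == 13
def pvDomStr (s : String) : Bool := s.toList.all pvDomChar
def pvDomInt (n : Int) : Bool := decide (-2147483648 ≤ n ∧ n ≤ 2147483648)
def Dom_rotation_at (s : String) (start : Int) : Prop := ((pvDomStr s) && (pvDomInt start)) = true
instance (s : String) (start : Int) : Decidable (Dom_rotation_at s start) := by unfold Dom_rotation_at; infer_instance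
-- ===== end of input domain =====

-- B builds the rotation as the two slices s[k:] + s[:k] with k = start % n, instead of A's per-character modular-index loop.

-- ===== PORT A =====
-- 'result = result + s[idx]': idx = (start+i) % n always lies in [0, n) when the loop body runs,
-- so Python never raises here; the port appends pyGet?'s value via Option.elim (exact on every input).
def rotation_at (s : String) (start : Int) : String :=
  let n : Int := PySem.Str.len s
  String.ofList ((PySem.List.pyRange 0 n 1).foldl
    (fun acc i =>
      acc ++ (PySem.List.pyGet? s.toList (PySem.Int.mod (start + i) n)).elim [] (fun c => [c])) [])

-- ===== PORT B =====
def rotation_at_alt (s : String) (start : Int) : String :=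
  let n : Int := PySem.Str.len s
  if n = 0 then "" else
    let k : Int := PySem.Int.mod start n
    String.ofList (PySem.List.slice s.toList (some k) none ++ PySem.List.slice s.toList none (some k))

-- ===== PRECONDITION & SPEC =====
def Spec_rotation_at (s : String) (start : Int) (out : String) : Prop := out = rotation_at_alt s start
instance (s : String) (start : Int) (out : String) : Decidable (Spec_rotation_at s start out) := by unfold Spec_rotation_at; infer_instance

-- ===== CLAIM (what is proved, stated in full; the proofs are below) =====
def Claim_equal_rotation_at : Prop := ∀ (s : String) (start : Int), Dom_rotation_at s start → Spec_rotation_at s start (rotation_at s start)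

-- ===== LEMMAS AND PROOFS =====

-- flatMap of a function that is singleton-valued on the list is a map
theorem flatMap_singletons {α β : Type} (xs : List α) (g : α → List β) (f : α → β)
    (h : ∀ x ∈ xs, g x = [f x]) : xs.flatMap g = xs.map f := by
  induction xs with
  | nil => rfl
  | cons x xs ih =>
    simp only [List.flatMap_cons, List.map_cons, h x (by simp)]
    rw [ih (fun y hy => h y (by simp [hy]))]
    rfl

-- Core fact: A's loop over the nonempty character list l produces the rotation of l by start % |l|.
theorem rotation_loop_eq_rotate (l : List Char) (start : Int) (hl : l ≠ []) :
    (PySem.List.pyRange 0 (l.length : Int) 1).foldl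
      (fun acc i =>
        acc ++ (PySem.List.pyGet? l (PySem.Int.mod (start + i) (l.length : Int))).elim [] (fun c => [c])) []
    = l.rotate (PySem.Int.mod start (l.length : Int)).toNat := by
  have hlen : 0 < l.length := List.length_pos_iff.mpr hl
  have hn : 0 < (l.length : Int) := by exact_mod_cast hlen
  set n : Int := (l.length : Int) with hn_def
  set k : Nat := (PySem.Int.mod start n).toNat with hk_def
  have hmod : PySem.Int.mod start n = start % n := PySem.Int.mod_eq_emod_of_pos hn
  have hk_cast : (k : Int) = start % n := by
    rw [hk_def, hmod]
    exact Int.toNat_of_nonneg (Int.emod_nonneg _ (by omega))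
  have hk_lt : k < l.length := by
    have h1 : PySem.Int.mod start n < n := PySem.Int.mod_lt start hn
    have h0 : 0 ≤ PySem.Int.mod start n := PySem.Int.mod_nonneg start hn
    omega
  rw [PySem.List.foldl_append_eq_flatMap, List.nil_append, PySem.List.pyRange_one]
  have h00 : ((n - 0).toNat) = l.length := by omega
  rw [h00, List.flatMap_map]
  rw [flatMap_singletons (List.range l.length) _
      (fun j => (l.rotate k).getD j 'a')
      ?_]
  · -- the resulting map over range is the rotation itself
    apply List.ext_getElem
    · simp [List.length_rotate]
    · intro j h1 h2
      simp only [List.getElem_map, List.getElem_range]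
      rw [List.getD_eq_getElem _ _ (by simpa [List.length_rotate] using h2)]
  · intro j hj
    have hj' : j < l.length := List.mem_range.mp hj
    -- compute the index Python uses
    have hidx : PySem.Int.mod (start + ((0 : Int) + (j : Int))) n = (((j + k) % l.length : Nat) : Int) := by
      rw [PySem.Int.mod_eq_emod_of_pos hn]
      have e1 : (start + ((0 : Int) + (j : Int))) % n = (((j : Int) + (k : Int))) % n := by
        rw [hk_cast]
        conv_lhs => rw [show start + ((0 : Int) + (j : Int)) = (j : Int) + start by ring, Int.add_emod]
        conv_rhs => rw [Int.add_emod, Int.emod_emod_of_dvd start (dvd_refl n)]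
      rw [e1]
      push_cast
      rfl
    rw [hidx, PySem.List.pyGet?_natCast]
    have hlt : (j + k) % l.length < l.length := Nat.mod_lt _ hlen
    rw [List.getElem?_eq_getElem hlt]
    show [l[(j + k) % l.length]] = [(l.rotate k).getD j 'a']
    rw [List.getD_eq_getElem _ _ (by simpa [List.length_rotate] using hj')]
    rw [List.getElem_rotate]

-- ===== VERDICT (by name: the statement is the Claim_ definition above) =====
theorem rotation_at_spec : Claim_equal_rotation_at := by
  intro s start _
  unfold Spec_rotation_at rotation_at rotation_at_alt
  simp only [PySem.Str.len_eq]
  by_cases h : s.toList = []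
  · simp [h]
  · have hlen : 0 < s.toList.length := List.length_pos_iff.mpr h
    have hn : (0 : Int) < (s.toList.length : Int) := by exact_mod_cast hlen
    rw [if_neg (by omega)]
    have hk0 : 0 ≤ PySem.Int.mod start (s.toList.length : Int) := PySem.Int.mod_nonneg start hn
    rw [rotation_loop_eq_rotate s.toList start h]
    rw [PySem.List.slice_from s.toList hk0, PySem.List.slice_to s.toList hk0]
    have hk_lt : (PySem.Int.mod start (s.toList.length : Int)).toNat < s.toList.length := by
      have h1 := PySem.Int.mod_lt start hn
      have h0 := PySem.Int.mod_nonneg start hn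
      omega
    rw [List.rotate_eq_drop_append_take (le_of_lt hk_lt)]
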